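-- pv_equiv track=rewrite | github.com/MProductionsmado/GAN-SAGAN | src/models/discriminator.py | _disc_channel_schedule
-- ===== SOURCE A (Python) =====
-- def _disc_channel_schedule(base_channels: int, num_downs: int) -> list[int]:
--     """Channel widths for the discriminator (ascending with depth).
--
--     Starts at base_channels after DiscOptBlock, doubles each stage, capped at
--     16 × base_channels.
--     """
--     max_ch = base_channels * 16
--     channels = [base_channels]
--     ch = base_channels
--     for _ in range(num_downs):
--         ch = min(ch * 2, max_ch)
--         channels.append(ch)
--     return channels
-- ===== SOURCE B (Python) =====
-- def _disc_channel_schedule(base_channels: int, num_downs: int) -> list[int]: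
--     """Channel widths for the discriminator (ascending with depth).
--
--     Closed form: the doubling-with-cap recurrence gives base * 2**min(i, 4)
--     at depth i (cap 16*base = base * 2**4), so each width is computed
--     independently, with no running accumulator.
--     """
--     return [base_channels] + [base_channels * 2 ** min(i, 4)
--                               for i in range(1, num_downs + 1)]
-- ===== Notes on version B (the rewrite author's own statement) =====
-- stated objective: idiomatic
-- what changed: Replaces the running accumulator ch with its closed form base_channels * 2**min(i,4) (the 16x cap is base*2^4), computing every width independently in one comprehension.
-- outside the precondition, e.g. on _disc_channel_schedule(-1, 2): A returns [-1, -16, -32], B returns [-1, -2, -4]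
import Mathlib
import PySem

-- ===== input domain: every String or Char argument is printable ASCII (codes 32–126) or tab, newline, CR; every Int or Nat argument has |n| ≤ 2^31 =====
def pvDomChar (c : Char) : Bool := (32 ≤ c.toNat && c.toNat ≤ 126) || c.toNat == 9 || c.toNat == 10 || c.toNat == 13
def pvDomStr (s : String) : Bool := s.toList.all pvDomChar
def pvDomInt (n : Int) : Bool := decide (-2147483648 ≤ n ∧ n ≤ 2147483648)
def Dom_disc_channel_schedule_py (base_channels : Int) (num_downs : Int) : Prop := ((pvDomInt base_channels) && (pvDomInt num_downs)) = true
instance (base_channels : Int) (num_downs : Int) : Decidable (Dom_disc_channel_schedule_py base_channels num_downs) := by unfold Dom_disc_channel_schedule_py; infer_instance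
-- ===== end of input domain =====

-- B replaces A's running doubling-with-cap accumulator by the closed form base*2^min(i,4); equal on Pre_ (0 ≤ base_channels).
-- ===== PORT A =====
def disc_channel_schedule_py (base_channels : Int) (num_downs : Int) : List Int :=
  let max_ch := base_channels * 16
  let st := (PySem.List.pyRange 0 num_downs 1).foldl
    (fun (st : List Int × Int) _ =>
      let ch := min (st.2 * 2) max_ch
      (st.1 ++ [ch], ch)) ([base_channels], base_channels)
  st.1

-- ===== PORT B =====
def disc_channel_schedule_py_alt (base_channels : Int) (num_downs : Int) : List Int :=
  [base_channels] ++ (PySem.List.pyRange 1 (num_downs + 1) 1).map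
    (fun i => base_channels * 2 ^ (min i 4).toNat)

-- ===== PRECONDITION & SPEC =====
-- Pre_ restricts to the task's natural domain: channel widths are nonnegative counts. A still RETURNS on
-- negative base_channels, but there the cap binds immediately and A keeps doubling past it (e.g. A(-1,2) =
-- [-1,-16,-32]), an artefact B's closed form does not reproduce (B gives [-1,-2,-4]); see claim cites.
def Pre_disc_channel_schedule_py (base_channels : Int) (num_downs : Int) : Prop :=
  0 ≤ base_channels
instance (base_channels : Int) (num_downs : Int) : Decidable (Pre_disc_channel_schedule_py base_channels num_downs) := by
  unfold Pre_disc_channel_schedule_py; infer_instance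
def pvWitness_disc_channel_schedule_py : Int × Int := (64, 4)

def Spec_disc_channel_schedule_py (base_channels : Int) (num_downs : Int) (out : List Int) : Prop := out = disc_channel_schedule_py_alt base_channels num_downs
instance (base_channels : Int) (num_downs : Int) (out : List Int) : Decidable (Spec_disc_channel_schedule_py base_channels num_downs out) := by unfold Spec_disc_channel_schedule_py; infer_instance

-- ===== CLAIM (what is proved, stated in full; the proofs are below) =====
def Claim_equal_disc_channel_schedule_py : Prop := ∀ (base_channels : Int) (num_downs : Int), Dom_disc_channel_schedule_py base_channels num_downs → Pre_disc_channel_schedule_py base_channels num_downs → Spec_disc_channel_schedule_py base_channels num_downs (disc_channel_schedule_py base_channels num_downs)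

-- ===== LEMMAS AND PROOFS =====

-- the capped-doubling step equals advancing the closed-form exponent, for nonnegative base
lemma step_closed (b : Int) (hb : 0 ≤ b) (k : Nat) :
    min (b * 2 ^ min k 4 * 2) (b * 16) = b * 2 ^ min (k + 1) 4 := by
  have h : b * 2 ^ min k 4 * 2 = b * 2 ^ (min k 4 + 1) := by ring
  rw [h, ← mul_min_of_nonneg _ _ hb]
  by_cases hk : k < 4
  · interval_cases k <;> norm_num
  · have h1 : min k 4 = 4 := by omega
    have h2 : min (k + 1) 4 = 4 := by omega
    rw [h1, h2]; norm_num

-- invariant of A's loop over List.range k (loop body ignores the loop variable)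
lemma loop_eq (b : Int) (hb : 0 ≤ b) (k : Nat) :
    (List.range k).foldl
      (fun (st : List Int × Int) _ =>
        (st.1 ++ [min (st.2 * 2) (b * 16)], min (st.2 * 2) (b * 16))) ([b], b)
    = ([b] ++ (List.range k).map (fun j => b * 2 ^ min (j + 1) 4), b * 2 ^ min k 4) := by
  induction k with
  | zero => simp
  | succ k ih =>
      rw [List.range_succ, List.foldl_append, List.map_append, ih]
      simp [step_closed b hb k]

theorem disc_channel_schedule_py_spec : Claim_equal_disc_channel_schedule_py := by
  intro b n _ hb
  unfold Spec_disc_channel_schedule_py disc_channel_schedule_py disc_channel_schedule_py_alt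
  rw [PySem.List.pyRange_one 0 n, PySem.List.pyRange_one 1 (n + 1)]
  have hn : (n - 0).toNat = n.toNat := by omega
  have hn' : (n + 1 - 1).toNat = n.toNat := by omega
  rw [hn, hn']
  dsimp only
  rw [List.foldl_map, List.map_map]
  have := loop_eq b hb n.toNat
  simp only [] at this ⊢
  rw [this]
  simp only [List.append_cancel_left_eq]
  apply List.map_congr_left
  intro j _
  have : (min ((1 : Int) + j) 4).toNat = min (j + 1) 4 := by omega
  simp [Function.comp, this]
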